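-- pv_equiv track=rewrite | github.com/SaurabhWani2107/SaurabhWani2107-Project-Bank-of-Maharashtra-Loan-Product-Assistant | rag_pipeline/rag_engine.py | is_greeting
-- ===== SOURCE A (Python) =====
-- def is_greeting(user_input: str) -> bool:
--     greetings = [
--         "hello", "hi", "hey", "good morning", "good afternoon", "good evening",
--         "greetings", "namaste", "hola", "bonjour", "hii"
--     ]
--     user_input_lower = user_input.lower().strip()
--     # Check if the input is exactly a greeting or starts with a greeting
--     return any(
--         user_input_lower == g or user_input_lower.startswith(g + " ") for g in greetings
--     )
-- ===== SOURCE B (Python) =====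
-- _TAILS = ("morning", "afternoon", "evening")
-- _WORDS = ("hello", "hi", "hey", "greetings", "namaste", "hola", "bonjour", "hii")
--
--
-- def is_greeting(user_input: str) -> bool:
--     t = user_input.lower().strip()
--     head = t.split(" ", 1)[0]
--     if head == "good":
--         return t[5:].split(" ", 1)[0] in _TAILS
--     return head in _WORDS
-- ===== Notes on version B (the rewrite author's own statement) =====
-- stated objective: alternative
-- what changed: Instead of scanning all 11 greetings testing equality-or-startswith for each, B splits off the first word once (split(' ',1)), dispatches on whether it is 'good', and does a single membership test of that word (or of the second word for the 'good ...' greetings) in a tuple.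
import Mathlib
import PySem

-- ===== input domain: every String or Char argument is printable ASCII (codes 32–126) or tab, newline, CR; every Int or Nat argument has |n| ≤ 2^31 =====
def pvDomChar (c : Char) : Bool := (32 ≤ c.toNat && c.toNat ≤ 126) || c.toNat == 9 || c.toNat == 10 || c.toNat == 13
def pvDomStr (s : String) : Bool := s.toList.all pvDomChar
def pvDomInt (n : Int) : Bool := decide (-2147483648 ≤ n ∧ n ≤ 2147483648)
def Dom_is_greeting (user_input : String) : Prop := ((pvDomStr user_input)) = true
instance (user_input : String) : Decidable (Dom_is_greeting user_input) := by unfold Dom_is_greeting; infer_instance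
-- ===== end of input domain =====

-- B replaces A's scan over 11 greetings (equality-or-startswith for each) by splitting off the
-- first word once, dispatching on whether it is "good", and one membership test; objective:
-- alternative, not measured faster.

-- ===== PORT A =====
def pvGreetings : List (List Char) :=
  ["hello".toList, "hi".toList, "hey".toList, "good morning".toList, "good afternoon".toList,
   "good evening".toList, "greetings".toList, "namaste".toList, "hola".toList, "bonjour".toList,
   "hii".toList]

def is_greeting (user_input : String) : Bool :=
  let user_input_lower := PySem.Chars.strip (PySem.Chars.lower user_input.toList)
  pvGreetings.any (fun g => user_input_lower == g || PySem.Chars.startswith user_input_lower (g ++ [' ']))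

-- ===== PORT B =====
def pvTails : List (List Char) := ["morning".toList, "afternoon".toList, "evening".toList]

def pvWords : List (List Char) :=
  ["hello".toList, "hi".toList, "hey".toList, "greetings".toList, "namaste".toList,
   "hola".toList, "bonjour".toList, "hii".toList]

-- `xs[0]` of a `str.split` result is never an IndexError (split is never empty): ported as pyGetD.
def is_greeting_alt (user_input : String) : Bool :=
  let t := PySem.Chars.strip (PySem.Chars.lower user_input.toList)
  let head := PySem.List.pyGetD (PySem.Chars.splitOnMax t [' '] 1) 0 []
  if head == "good".toList then
    pvTails.contains
      (PySem.List.pyGetD (PySem.Chars.splitOnMax (PySem.List.slice t (some 5)) [' '] 1) 0 [])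
  else
    pvWords.contains head

-- ===== PRECONDITION & SPEC =====
def Spec_is_greeting (user_input : String) (out : Bool) : Prop := out = is_greeting_alt user_input
instance (user_input : String) (out : Bool) : Decidable (Spec_is_greeting user_input out) := by unfold Spec_is_greeting; infer_instance

-- ===== CLAIM (what is proved, stated in full; the proofs are below) =====
def Claim_equal_is_greeting : Prop := ∀ (user_input : String), Dom_is_greeting user_input → Spec_is_greeting user_input (is_greeting user_input)

-- ===== LEMMAS AND PROOFS =====

/-- `split(sep, 0)` returns the whole remainder as one piece. -/
theorem pvGo0 (fuel : Nat) (l cur : List Char) (acc : List (List Char)) :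
    PySem.Chars.splitOnMax.go [' '] fuel 0 l cur acc = ((cur.reverse ++ l) :: acc).reverse := by
  cases fuel with
  | zero => simp [PySem.Chars.splitOnMax.go]
  | succ fuel => cases l <;> simp [PySem.Chars.splitOnMax.go]

theorem pvGo1_noSpace (fuel : Nat) : ∀ (l cur : List Char) (acc : List (List Char)),
    l.length < fuel → ' ' ∉ l →
    PySem.Chars.splitOnMax.go [' '] fuel 1 l cur acc = acc.reverse ++ [cur.reverse ++ l] := by
  induction fuel with
  | zero => intro l cur acc h _; omega
  | succ fuel ih =>
    intro l cur acc h hl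
    cases l with
    | nil => simp [PySem.Chars.splitOnMax.go]
    | cons c rest =>
      simp only [List.mem_cons, not_or] at hl
      rw [show PySem.Chars.splitOnMax.go [' '] (fuel+1) 1 (c::rest) cur acc
            = PySem.Chars.splitOnMax.go [' '] fuel 1 rest (c :: cur) acc by
          simp [PySem.Chars.splitOnMax.go, List.isPrefixOf, hl.1]]
      rw [ih rest (c :: cur) acc (by simpa using Nat.lt_of_succ_lt_succ h) hl.2]
      simp

theorem pvGo1_space (fuel : Nat) : ∀ (w r cur : List Char) (acc : List (List Char)),
    (w ++ ' ' :: r).length < fuel → ' ' ∉ w →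
    PySem.Chars.splitOnMax.go [' '] fuel 1 (w ++ ' ' :: r) cur acc
      = acc.reverse ++ [cur.reverse ++ w, r] := by
  induction fuel with
  | zero => intro w r cur acc h _; omega
  | succ fuel ih =>
    intro w r cur acc h hw
    cases w with
    | nil =>
      rw [show ([] : List Char) ++ ' ' :: r = ' ' :: r from rfl]
      rw [show PySem.Chars.splitOnMax.go [' '] (fuel+1) 1 (' '::r) cur acc
            = PySem.Chars.splitOnMax.go [' '] fuel 0 r [] (cur.reverse :: acc) by
          simp [PySem.Chars.splitOnMax.go, List.isPrefixOf]]
      rw [pvGo0]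
      simp
    | cons c w' =>
      simp only [List.mem_cons, not_or] at hw
      rw [show (c :: w') ++ ' ' :: r = c :: (w' ++ ' ' :: r) from rfl]
      rw [show PySem.Chars.splitOnMax.go [' '] (fuel+1) 1 (c :: (w' ++ ' ' :: r)) cur acc
            = PySem.Chars.splitOnMax.go [' '] fuel 1 (w' ++ ' ' :: r) (c :: cur) acc by
          simp [PySem.Chars.splitOnMax.go, List.isPrefixOf, hw.1]]
      rw [ih w' r (c :: cur) acc (by simp at h ⊢; omega) hw.2]
      simp

theorem pvSplit1_noSpace (t : List Char) (h : ' ' ∉ t) :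
    PySem.Chars.splitOnMax t [' '] 1 = [t] := by
  unfold PySem.Chars.splitOnMax
  rw [if_neg (by norm_num)]
  rw [show ((1 : Int)).toNat = 1 from rfl]
  rw [pvGo1_noSpace (t.length + 1) t [] [] (by omega) h]
  simp

theorem pvSplit1_space (w r : List Char) (h : ' ' ∉ w) :
    PySem.Chars.splitOnMax (w ++ ' ' :: r) [' '] 1 = [w, r] := by
  unfold PySem.Chars.splitOnMax
  rw [if_neg (by norm_num)]
  rw [show ((1 : Int)).toNat = 1 from rfl]
  rw [pvGo1_space ((w ++ ' ' :: r).length + 1) w r [] [] (by omega) h]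
  simp

/-- Decompose a character list at its first space (if any). -/
theorem pvDecomp (t : List Char) :
    ' ' ∉ t ∨ ∃ w r, t = w ++ ' ' :: r ∧ ' ' ∉ w := by
  induction t with
  | nil => exact Or.inl (by simp)
  | cons c l ih =>
    by_cases hc : c = ' '
    · exact Or.inr ⟨[], l, by simp [hc], by simp⟩
    · rcases ih with h | ⟨w, r, rfl, hw⟩
      · exact Or.inl (by simp [Ne.symm hc, h])
      · exact Or.inr ⟨c :: w, r, by simp, by simp [Ne.symm hc, hw]⟩

/-- Aligning at the first space: prefix version. -/
theorem pvPrefix_space (g : List Char) : ∀ (w x r : List Char), ' ' ∉ g → ' ' ∉ w →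
    ((g ++ ' ' :: x) <+: (w ++ ' ' :: r) ↔ g = w ∧ x <+: r) := by
  induction g with
  | nil =>
    intro w x r _ hw
    cases w with
    | nil => simp [List.cons_prefix_cons]
    | cons c wl =>
      simp only [List.mem_cons, not_or] at hw
      simp [List.cons_prefix_cons, hw.1]
  | cons a gl ih =>
    intro w x r hg hw
    simp only [List.mem_cons, not_or] at hg
    cases w with
    | nil => simp [List.cons_prefix_cons, Ne.symm hg.1]
    | cons c wl =>
      simp only [List.mem_cons, not_or] at hw
      simp only [List.cons_append, List.cons_prefix_cons, List.cons.injEq]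
      rw [ih wl x r hg.2 hw.2]
      tauto

/-- Aligning at the first space: equality version. -/
theorem pvEq_space {g w x r : List Char} (hg : ' ' ∉ g) (hw : ' ' ∉ w) :
    (g ++ ' ' :: x = w ++ ' ' :: r ↔ g = w ∧ x = r) := by
  constructor
  · intro h
    have hp : (g ++ ' ' :: x) <+: (w ++ ' ' :: r) := h ▸ List.prefix_refl _
    obtain ⟨rfl, -⟩ := (pvPrefix_space g w x r hg hw).mp hp
    exact ⟨rfl, by simpa using h⟩
  · rintro ⟨rfl, rfl⟩; rfl

/-- A's clause for a one-word greeting, on an input whose first word is `w`. -/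
theorem pvOneAtom (g w r : List Char) (hg : ' ' ∉ g) (hw : ' ' ∉ w) :
    ((w ++ ' ' :: r) == g || PySem.Chars.startswith (w ++ ' ' :: r) (g ++ [' '])) = (w == g) := by
  rw [Bool.eq_iff_iff]
  simp only [Bool.or_eq_true, beq_iff_eq, PySem.Chars.startswith_iff]
  have h1 : ¬ (w ++ ' ' :: r = g) := fun h => hg (h ▸ (by simp : ' ' ∈ w ++ ' ' :: r))
  have h2 : (g ++ [' ']) <+: (w ++ ' ' :: r) ↔ g = w ∧ ([] : List Char) <+: r :=
    pvPrefix_space g w [] r hg hw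
  simp [h1, h2]
  tauto

/-- A's clause for a two-word greeting `a++' '::b`, input `w++' '::r` with no space in `r`. -/
theorem pvTwoAtomA (a b w r : List Char) (ha : ' ' ∉ a) (_hb : ' ' ∉ b) (hw : ' ' ∉ w)
    (hr : ' ' ∉ r) :
    ((w ++ ' ' :: r) == (a ++ ' ' :: b) ||
      PySem.Chars.startswith (w ++ ' ' :: r) ((a ++ ' ' :: b) ++ [' '])) =
    (w == a && r == b) := by
  rw [Bool.eq_iff_iff]
  simp only [Bool.or_eq_true, Bool.and_eq_true, beq_iff_eq, PySem.Chars.startswith_iff]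
  have h1 : (w ++ ' ' :: r = a ++ ' ' :: b) ↔ w = a ∧ r = b := pvEq_space hw ha
  have h2 : ¬ ((a ++ ' ' :: b) ++ [' ']) <+: (w ++ ' ' :: r) := by
    rw [show (a ++ ' ' :: b) ++ [' '] = a ++ ' ' :: (b ++ [' ']) by simp]
    rw [pvPrefix_space a w (b ++ [' ']) r ha hw]
    rintro ⟨-, hpre⟩
    exact hr (hpre.subset (by simp))
  constructor
  · rintro (h | h)
    · exact h1.mp h
    · exact (h2 h).elim
  · exact fun h => Or.inl (h1.mpr h)

/-- A's clause for a two-word greeting, input with (at least) two spaces. -/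
theorem pvTwoAtomB (a b w w2 r2 : List Char) (ha : ' ' ∉ a) (hb : ' ' ∉ b) (hw : ' ' ∉ w)
    (hw2 : ' ' ∉ w2) :
    ((w ++ ' ' :: (w2 ++ ' ' :: r2)) == (a ++ ' ' :: b) ||
      PySem.Chars.startswith (w ++ ' ' :: (w2 ++ ' ' :: r2)) ((a ++ ' ' :: b) ++ [' '])) =
    (w == a && w2 == b) := by
  rw [Bool.eq_iff_iff]
  simp only [Bool.or_eq_true, Bool.and_eq_true, beq_iff_eq, PySem.Chars.startswith_iff]
  have h1 : ¬ (w ++ ' ' :: (w2 ++ ' ' :: r2) = a ++ ' ' :: b) := by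
    rw [pvEq_space hw ha]
    rintro ⟨-, rfl⟩
    exact hb (by simp)
  have h2 : ((a ++ ' ' :: b) ++ [' ']) <+: (w ++ ' ' :: (w2 ++ ' ' :: r2)) ↔ a = w ∧ b = w2 := by
    rw [show (a ++ ' ' :: b) ++ [' '] = a ++ ' ' :: (b ++ [' ']) by simp]
    rw [pvPrefix_space a w (b ++ [' ']) (w2 ++ ' ' :: r2) ha hw]
    rw [show b ++ [' '] = b ++ ' ' :: ([] : List Char) from rfl]
    rw [pvPrefix_space b w2 [] r2 hb hw2]
    simp
  constructor
  · rintro (h | h)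
    · exact (h1 h).elim
    · obtain ⟨rfl, rfl⟩ := h2.mp h
      exact ⟨rfl, rfl⟩
  · rintro ⟨rfl, rfl⟩
    exact Or.inr (h2.mpr ⟨rfl, rfl⟩)

set_option maxHeartbeats 1000000 in
/-- The core equivalence, for an arbitrary (already lowered and stripped) character list. -/
theorem pvCore (t : List Char) :
    (pvGreetings.any fun g => t == g || PySem.Chars.startswith t (g ++ [' '])) =
    (if PySem.List.pyGetD (PySem.Chars.splitOnMax t [' '] 1) 0 [] == "good".toList then
      pvTails.contains
        (PySem.List.pyGetD (PySem.Chars.splitOnMax (PySem.List.slice t (some 5)) [' '] 1) 0 [])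
    else
      pvWords.contains (PySem.List.pyGetD (PySem.Chars.splitOnMax t [' '] 1) 0 [])) := by
  rcases pvDecomp t with hns | ⟨w, r, rfl, hw⟩
  · -- no space in t
    rw [pvSplit1_noSpace t hns, PySem.List.pyGetD_zero_cons t [] []]
    by_cases hg : t = "good".toList
    · subst hg; decide
    · rw [if_neg (by simpa using hg)]
      have hpref : ∀ g : List Char, ((g ++ [' ']) <+: t) = False :=
        fun g => eq_false fun h => hns (h.subset (by simp))
      have hne2 : ∀ g : List Char, ' ' ∈ g → ¬ (t = g) := fun g hsp h => hns (h ▸ hsp)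
      rw [Bool.eq_iff_iff]
      simp only [pvGreetings, pvWords, List.any_cons, List.any_nil, List.contains_cons,
        List.contains_nil, Bool.or_eq_true, beq_iff_eq, PySem.Chars.startswith_iff, hpref,
        Bool.false_eq_true, or_false]
      rw [eq_false (hne2 "good morning".toList (by decide)),
        eq_false (hne2 "good afternoon".toList (by decide)),
        eq_false (hne2 "good evening".toList (by decide))]
      tauto
  · -- t = w ++ ' ' :: r with no space in w
    have e1 : "good morning".toList = "good".toList ++ ' ' :: "morning".toList := rfl
    have e2 : "good afternoon".toList = "good".toList ++ ' ' :: "afternoon".toList := rfl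
    have e3 : "good evening".toList = "good".toList ++ ' ' :: "evening".toList := rfl
    rw [pvSplit1_space w r hw, PySem.List.pyGetD_zero_cons w [r] []]
    have hones : ∀ x : List Char,
        (pvGreetings.any fun g => (w ++ ' ' :: r) == g ||
            PySem.Chars.startswith (w ++ ' ' :: r) (g ++ [' '])) =
          ((w == "hello".toList) || (w == "hi".toList) || (w == "hey".toList) ||
           ((w ++ ' ' :: r) == "good morning".toList ||
             PySem.Chars.startswith (w ++ ' ' :: r) ("good morning".toList ++ [' '])) ||
           ((w ++ ' ' :: r) == "good afternoon".toList ||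
             PySem.Chars.startswith (w ++ ' ' :: r) ("good afternoon".toList ++ [' '])) ||
           ((w ++ ' ' :: r) == "good evening".toList ||
             PySem.Chars.startswith (w ++ ' ' :: r) ("good evening".toList ++ [' '])) ||
           (w == "greetings".toList) || (w == "namaste".toList) || (w == "hola".toList) ||
           (w == "bonjour".toList) || (w == "hii".toList)) := by
      intro x
      simp only [pvGreetings, List.any_cons, List.any_nil, Bool.or_false]
      rw [pvOneAtom "hello".toList w r (by decide) hw,
        pvOneAtom "hi".toList w r (by decide) hw,
        pvOneAtom "hey".toList w r (by decide) hw,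
        pvOneAtom "greetings".toList w r (by decide) hw,
        pvOneAtom "namaste".toList w r (by decide) hw,
        pvOneAtom "hola".toList w r (by decide) hw,
        pvOneAtom "bonjour".toList w r (by decide) hw,
        pvOneAtom "hii".toList w r (by decide) hw]
      ac_rfl
    by_cases hg : w = "good".toList
    · subst hg
      rw [if_pos (by decide)]
      have hdrop : PySem.List.slice ("good".toList ++ ' ' :: r) (some 5) = r := by
        rw [PySem.List.slice_from _ (by norm_num)]
        rfl
      rw [hdrop]
      rcases pvDecomp r with hnr | ⟨w2, r2, rfl, hw2⟩
      · rw [pvSplit1_noSpace r hnr, PySem.List.pyGetD_zero_cons r [] []]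
        rw [hones []]
        rw [e1, e2, e3,
          pvTwoAtomA "good".toList "morning".toList _ r (by decide) (by decide) (by decide) hnr,
          pvTwoAtomA "good".toList "afternoon".toList _ r (by decide) (by decide) (by decide) hnr,
          pvTwoAtomA "good".toList "evening".toList _ r (by decide) (by decide) (by decide) hnr]
        rw [Bool.eq_iff_iff]
        simp only [pvTails, List.contains_cons, List.contains_nil, Bool.or_eq_true,
          Bool.and_eq_true, beq_iff_eq]
        simp only [show ("good".toList = ['g','o','o','d']) from rfl, true_and]
        tauto
      · rw [pvSplit1_space w2 r2 hw2, PySem.List.pyGetD_zero_cons w2 [r2] []]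
        rw [hones []]
        rw [e1, e2, e3,
          pvTwoAtomB "good".toList "morning".toList _ w2 r2 (by decide) (by decide) (by decide) hw2,
          pvTwoAtomB "good".toList "afternoon".toList _ w2 r2 (by decide) (by decide) (by decide) hw2,
          pvTwoAtomB "good".toList "evening".toList _ w2 r2 (by decide) (by decide) (by decide) hw2]
        rw [Bool.eq_iff_iff]
        simp only [pvTails, List.contains_cons, List.contains_nil, Bool.or_eq_true,
          Bool.and_eq_true, beq_iff_eq]
        simp only [show ("good".toList = ['g','o','o','d']) from rfl, true_and]
        tauto
    · rw [if_neg (by simpa using hg)]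
      rw [hones []]
      have htwo : ∀ b : List Char, ' ' ∉ b →
          ((w ++ ' ' :: r) == ("good".toList ++ ' ' :: b) ||
            PySem.Chars.startswith (w ++ ' ' :: r) (("good".toList ++ ' ' :: b) ++ [' '])) = false := by
        intro b hb
        have hg' : w ≠ ['g','o','o','d'] := by simpa using hg
        rcases pvDecomp r with hnr | ⟨w2, r2, rfl, hw2⟩
        · rw [pvTwoAtomA "good".toList b w r (by decide) hb hw hnr]
          simp [hg']
        · rw [pvTwoAtomB "good".toList b w w2 r2 (by decide) hb hw hw2]
          simp [hg']
      rw [e1, e2, e3, htwo "morning".toList (by decide), htwo "afternoon".toList (by decide),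
        htwo "evening".toList (by decide)]
      rw [Bool.eq_iff_iff]
      simp only [pvWords, List.contains_cons, List.contains_nil, Bool.or_eq_true, beq_iff_eq,
        Bool.false_eq_true, or_false]
      generalize "hello".toList = s1
      generalize "hi".toList = s2
      generalize "hey".toList = s3
      generalize "greetings".toList = s4
      generalize "namaste".toList = s5
      generalize "hola".toList = s6
      generalize "bonjour".toList = s7
      generalize "hii".toList = s8
      tauto

-- ===== VERDICT (by name: the statement is the Claim_ definition above) =====
theorem is_greeting_spec : Claim_equal_is_greeting := by
  intro user_input _
  unfold Spec_is_greeting is_greeting is_greeting_alt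
  exact pvCore _
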